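-- pv_equiv track=rewrite | github.com/Spico197/DocEE | dee/utils.py | assign_role_from_gold_to_comb
-- ===== SOURCE A (Python) =====
-- from collections import defaultdict
--
-- def assign_role_from_gold_to_comb(comb, gold_comb):
--     r"""
--     pass the roles in gold combination to pred combination
--     role will be `None` if there's no such mapping
--
--     Returns:
--         [(0, {1, 2}), (1, None)]
--     """
--     span_idx2roles = defaultdict(set)
--     for span_idx, role in gold_comb:
--         span_idx2roles[span_idx].add(role)
--     new_comb = []
--     for span_idx in comb:
--         new_comb.append((span_idx, span_idx2roles.get(span_idx, None)))
--     return new_comb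
-- ===== SOURCE B (Python) =====
-- def assign_role_from_gold_to_comb(comb, gold_comb):
--     new_comb = []
--     for span_idx in comb:
--         roles = {role for sidx, role in gold_comb if sidx == span_idx}
--         new_comb.append((span_idx, roles or None))
--     return new_comb
-- ===== Notes on version B (the rewrite author's own statement) =====
-- stated objective: simpler
-- what changed: Replaced the build-defaultdict-index-then-lookup strategy with a direct per-span set comprehension over gold_comb (roles or None), dropping the index structure entirely.
import Mathlib
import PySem

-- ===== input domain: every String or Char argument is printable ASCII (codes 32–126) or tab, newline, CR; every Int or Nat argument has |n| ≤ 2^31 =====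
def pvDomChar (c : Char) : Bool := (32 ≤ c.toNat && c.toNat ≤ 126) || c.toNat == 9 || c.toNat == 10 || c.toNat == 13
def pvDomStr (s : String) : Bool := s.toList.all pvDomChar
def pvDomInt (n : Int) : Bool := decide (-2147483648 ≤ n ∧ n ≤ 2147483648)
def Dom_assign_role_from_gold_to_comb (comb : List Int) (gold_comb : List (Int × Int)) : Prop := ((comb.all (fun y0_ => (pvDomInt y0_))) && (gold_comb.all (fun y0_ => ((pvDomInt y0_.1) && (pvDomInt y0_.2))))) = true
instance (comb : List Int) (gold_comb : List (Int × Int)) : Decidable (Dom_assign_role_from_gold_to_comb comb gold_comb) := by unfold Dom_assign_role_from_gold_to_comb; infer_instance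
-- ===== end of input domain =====

-- B drops A's defaultdict index and instead collects each span's roles by a direct set
-- comprehension over gold_comb ('roles or None'): simpler, no index structure.
-- ===== PORT A =====
def assign_role_from_gold_to_comb (comb : List Int) (gold_comb : List (Int × Int)) : List (Int × Option (List Int)) :=
  -- span_idx2roles = defaultdict(set); for span_idx, role in gold_comb: span_idx2roles[span_idx].add(role)
  let span_idx2roles : PySem.Dict Int (PySem.Set Int) :=
    gold_comb.foldl (fun d p => d.modify p.1 PySem.Set.empty (fun s => PySem.Set.add s p.2)) PySem.Dict.empty
  -- new_comb = []; for span_idx in comb: new_comb.append((span_idx, span_idx2roles.get(span_idx, None)))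
  comb.foldl (fun new_comb span_idx => new_comb ++ [(span_idx, span_idx2roles.get? span_idx)]) []

-- ===== PORT B =====
def assign_role_from_gold_to_comb_alt (comb : List Int) (gold_comb : List (Int × Int)) : List (Int × Option (List Int)) :=
  comb.map (fun span_idx =>
    -- roles = {role for sidx, role in gold_comb if sidx == span_idx}
    let roles : PySem.Set Int :=
      PySem.Set.ofList ((gold_comb.filter (fun p => p.1 == span_idx)).map Prod.snd)
    -- (span_idx, roles or None)
    (span_idx, if roles = [] then none else some roles))

-- ===== PRECONDITION & SPEC =====
def Spec_assign_role_from_gold_to_comb (comb : List Int) (gold_comb : List (Int × Int)) (out : List (Int × Option (List Int))) : Prop := out = assign_role_from_gold_to_comb_alt comb gold_comb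
instance (comb : List Int) (gold_comb : List (Int × Int)) (out : List (Int × Option (List Int))) : Decidable (Spec_assign_role_from_gold_to_comb comb gold_comb out) := by unfold Spec_assign_role_from_gold_to_comb; infer_instance

-- ===== CLAIM (what is proved, stated in full; the proofs are below) =====
def Claim_equal_assign_role_from_gold_to_comb : Prop := ∀ (comb : List Int) (gold_comb : List (Int × Int)), Dom_assign_role_from_gold_to_comb comb gold_comb → Spec_assign_role_from_gold_to_comb comb gold_comb (assign_role_from_gold_to_comb comb gold_comb)

-- ===== LEMMAS AND PROOFS =====

-- foldl Set.add from a nonempty start stays nonempty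
lemma pv_foldl_add_ne_nil (xs : List Int) : ∀ (s : PySem.Set Int), s ≠ [] →
    xs.foldl PySem.Set.add s ≠ [] := by
  induction xs with
  | nil => intro s hs; simpa using hs
  | cons x xs ih =>
    intro s hs
    simp only [List.foldl_cons]
    apply ih
    simp only [PySem.Set.add]
    split
    · exact hs
    · simp

lemma pv_ofList_eq_nil_iff (xs : List Int) : (PySem.Set.ofList xs = []) ↔ xs = [] := by
  cases xs with
  | nil => simp [PySem.Set.ofList]
  | cons x xs =>
    constructor
    · intro h
      exact absurd h (by
        rw [PySem.Set.ofList_eq_foldl]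
        simp only [List.foldl_cons]
        exact pv_foldl_add_ne_nil xs _ (by simp [PySem.Set.add]))
    · intro h; exact absurd h (by simp)

-- the built index looked up at s equals the direct scan of gold_comb
lemma pv_index_get? (l : List (Int × Int)) : ∀ (d : PySem.Dict Int (PySem.Set Int)) (s : Int),
    (l.foldl (fun d p => d.modify p.1 PySem.Set.empty (fun t => PySem.Set.add t p.2)) d).get? s =
      if (l.filter (fun p => p.1 == s)) = [] then d.get? s
      else some (((l.filter (fun p => p.1 == s)).map Prod.snd).foldl PySem.Set.add
        (d.getD s PySem.Set.empty)) := by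
  induction l with
  | nil => intro d s; simp
  | cons p l ih =>
    intro d s
    simp only [List.foldl_cons, List.filter_cons]
    by_cases h : p.1 = s
    · subst h
      have hget : (d.modify p.1 PySem.Set.empty (fun t => PySem.Set.add t p.2)).get? p.1
          = some (PySem.Set.add (d.getD p.1 PySem.Set.empty) p.2) := by
        simp [PySem.Dict.modify, PySem.Dict.get?_insert_self]
      have hgetD : (d.modify p.1 PySem.Set.empty (fun t => PySem.Set.add t p.2)).getD p.1 PySem.Set.empty
          = PySem.Set.add (d.getD p.1 PySem.Set.empty) p.2 := PySem.Dict.getD_modify_self d p.1 _ _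
      rw [ih]
      simp only [BEq.rfl, if_true, List.map_cons, List.foldl_cons]
      rw [if_neg (List.cons_ne_nil _ _)]
      split_ifs with h1
      · simp only [h1, List.map_nil, List.foldl_nil]
        exact hget
      · exact congrArg (fun t => some (List.foldl PySem.Set.add t
          (List.map Prod.snd (List.filter (fun q => q.1 == p.1) l)))) hgetD
    · have hget : (d.modify p.1 PySem.Set.empty (fun t => PySem.Set.add t p.2)).get? s
          = d.get? s := by
        simp [PySem.Dict.modify, PySem.Dict.get?_insert_of_ne _ _ (Ne.symm h)]
      have hgetD : (d.modify p.1 PySem.Set.empty (fun t => PySem.Set.add t p.2)).getD s PySem.Set.empty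
          = d.getD s PySem.Set.empty := by
        simp [PySem.Dict.getD_modify, Ne.symm h]
      rw [ih]
      rw [if_neg (show ¬((p.1 == s) = true) by simp [h]), hget, hgetD]

-- ===== VERDICT (by name: the statement is the Claim_ definition above) =====
theorem assign_role_from_gold_to_comb_spec : Claim_equal_assign_role_from_gold_to_comb := by
  intro comb gold_comb _
  unfold Spec_assign_role_from_gold_to_comb
  unfold assign_role_from_gold_to_comb assign_role_from_gold_to_comb_alt
  rw [PySem.List.foldl_append_singleton_eq_map]
  apply List.map_congr_left
  intro s _
  rw [pv_index_get? gold_comb PySem.Dict.empty s]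
  by_cases h : (gold_comb.filter (fun p => p.1 == s)) = []
  · simp [h, PySem.Set.ofList_eq_foldl]
  · have h2 : ((gold_comb.filter (fun p => p.1 == s)).map Prod.snd).foldl PySem.Set.add [] ≠ [] := by
      have := (pv_ofList_eq_nil_iff ((gold_comb.filter (fun p => p.1 == s)).map Prod.snd)).not
      rw [PySem.Set.ofList_eq_foldl] at this
      simpa [h] using this
    simp [h, h2, PySem.Set.ofList_eq_foldl, PySem.Dict.getD_empty]
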